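-- pv_equiv track=rewrite | github.com/Jungsu-lilly/coding_test_study | 프로그래머스/lv3/인사고과.py | solution
-- ===== SOURCE A (Python) =====
-- def solution(scores):
--     target = scores[0]
--     target_sum = sum(target)
--     scores.sort(key=lambda x: (-x[0], x[1])) #정렬을 통해, 항상 뒤에 있는
--     # 	[[3, 2], [3, 2], [2, 1], [2, 2], [1, 4]]
--
--     cmax = 0
--     ans = 1
--     for score in scores:
--         if target[0] < score[0] and target[1] < score[1]:
--             return -1
--         if cmax <= score[1]: #cmax보다 작으면
--             if target_sum < score[0] + score[1]:
--                 ans += 1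
--             cmax = score[1]
--             #항상 1번째 값은 최대값으로 한다.
--             #뒤에 오는 값들은 0번의 값으로 정렬되어있으므로,
--             #cmax보다 크거나 같다면, 지워지지 않는 거고,
--             #지워지지 않으면 target_sum과 비교해서 랭크를 하나씩 밀어낸다.
--     return ans
-- ===== SOURCE B (Python) =====
-- def solution(scores):
--     # Same in-place sort as the original (the argument mutation is identical);
--     # the incremental running-max pass is replaced by a direct nested dominance
--     # scan over the sorted data (the running max starts from the baseline 0,
--     # hence the 0 seeded into each max below).
--     target = scores[0]
--     target_sum = sum(target)
--     scores.sort(key=lambda x: (-x[0], x[1]))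
--     if any(target[0] < y[0] and target[1] < y[1] for y in scores):
--         return -1
--     ans = 1
--     for x in scores:
--         bar = max([0] + [y[1] for y in scores if x[0] < y[0]])
--         if bar <= x[1] and target_sum < x[0] + x[1]:
--             ans += 1
--     return ans
-- ===== Notes on version B (the rewrite author's own statement) =====
-- stated objective: alternative
-- what changed: Replaces A's single incremental running-max pass over the sorted list by a direct nested dominance scan (for each entry, compare against the max second coordinate among entries with strictly greater first coordinate, baseline 0) plus a separate any-scan for the -1 case; the in-place sort is kept so the argument mutation is identical.
import Mathlib
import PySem

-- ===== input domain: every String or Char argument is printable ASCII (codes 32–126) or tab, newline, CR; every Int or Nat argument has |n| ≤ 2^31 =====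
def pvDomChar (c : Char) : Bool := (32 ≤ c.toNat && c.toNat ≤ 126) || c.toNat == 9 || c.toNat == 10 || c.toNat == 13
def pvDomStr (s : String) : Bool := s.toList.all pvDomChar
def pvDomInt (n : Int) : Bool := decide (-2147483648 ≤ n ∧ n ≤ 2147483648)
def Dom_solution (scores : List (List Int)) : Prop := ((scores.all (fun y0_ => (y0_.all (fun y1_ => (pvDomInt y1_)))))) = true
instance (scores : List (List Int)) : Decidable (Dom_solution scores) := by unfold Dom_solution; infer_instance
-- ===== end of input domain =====

-- B keeps A's sort (so the in-place mutation of `scores` is identical) but replaces the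
-- incremental running-max pass by a nested dominance scan; equivalence is about the return value.


-- ===== PORT A =====
-- x[0] and x[1]; Pre_solution guarantees every inner list has length ≥ 2, so no IndexError
def pvFst (x : List Int) : Int := PySem.List.pyGetD x 0 0
def pvSec (x : List Int) : Int := PySem.List.pyGetD x 1 0
-- the sort key lambda x: (-x[0], x[1]); Python's tuple order is the lexicographic order
def solutionKey (x : List Int) : Lex (Int × Int) := toLex (-(pvFst x), pvSec x)

-- the for-loop of A, with early return -1; state = (cmax, ans)
def solutionLoop (t0 t1 ts : Int) : List (List Int) → Int → Int → Int
  | [], _, ans => ans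
  | s :: rest, cmax, ans =>
      if t0 < pvFst s ∧ t1 < pvSec s then -1
      else if cmax ≤ pvSec s then
        solutionLoop t0 t1 ts rest (pvSec s)
          (if ts < pvFst s + pvSec s then ans + 1 else ans)
      else solutionLoop t0 t1 ts rest cmax ans

def solution (scores : List (List Int)) : Int :=
  let target := scores.headD []                  -- scores[0]; Pre_solution excludes the empty list
  let target_sum := target.foldl (· + ·) 0       -- sum(target)
  let ss := PySem.List.sorted scores solutionKey -- scores.sort(key=lambda x: (-x[0], x[1]))
  solutionLoop (pvFst target) (pvSec target) target_sum ss 0 1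

-- ===== PORT B =====
-- bar = max([0] + [y[1] for y in scores if x0 < y[0]])
def solutionBar (ss : List (List Int)) (x0 : Int) : Int :=
  ((ss.filter (fun y => decide (x0 < pvFst y))).map pvSec).foldl max 0

def solution_alt (scores : List (List Int)) : Int :=
  let target := scores.headD []                  -- scores[0]; Pre_solution excludes the empty list
  let target_sum := target.foldl (· + ·) 0       -- sum(target)
  let ss := PySem.List.sorted scores solutionKey -- same in-place sort as A
  if ss.any (fun y => decide (pvFst target < pvFst y) && decide (pvSec target < pvSec y)) then -1
  else 1 + (ss.countP (fun x =>
      decide (solutionBar ss (pvFst x) ≤ pvSec x) && decide (target_sum < pvFst x + pvSec x)) : Int)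

-- ===== PRECONDITION & SPEC =====
-- exactly where the Python A returns: a nonempty list whose entries all have at least
-- two components (otherwise scores[0], x[0] or x[1] raises IndexError)
def Pre_solution (scores : List (List Int)) : Prop :=
  scores ≠ [] ∧ ∀ s ∈ scores, 2 ≤ s.length
instance (scores : List (List Int)) : Decidable (Pre_solution scores) := by
  unfold Pre_solution; infer_instance

def pvWitness_solution : List (List Int) := [[2, 2], [1, 4], [3, 2], [3, 2], [2, 1]]

def Spec_solution (scores : List (List Int)) (out : Int) : Prop := out = solution_alt scores
instance (scores : List (List Int)) (out : Int) : Decidable (Spec_solution scores out) := by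
  unfold Spec_solution; infer_instance

-- ===== CLAIM (what is proved, stated in full; the proofs are below) =====
def Claim_equal_solution : Prop := ∀ (scores : List (List Int)), Dom_solution scores → Pre_solution scores → Spec_solution scores (solution scores)

-- ===== LEMMAS AND PROOFS =====

-- if some element strictly dominates the target, the loop returns -1
-- running max: foldl max a l <= b iff a <= b and every element is <= b
-- main invariant at the end: on a sorted list with no dominator, the loop counts exactly
-- the entries not dominated (relative to baseline 0) whose coordinate sum beats the target sum
theorem solutionLoop_dom (t0 t1 ts : Int) :
    ∀ (l : List (List Int)) (c ans : Int),
      (∃ y ∈ l, t0 < pvFst y ∧ t1 < pvSec y) →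
      solutionLoop t0 t1 ts l c ans = -1 := by
  intro l
  induction l with
  | nil => simp
  | cons s rest ih =>
    intro c ans ⟨y, hy, hd⟩
    by_cases hs : t0 < pvFst s ∧ t1 < pvSec s
    · simp [solutionLoop, hs]
    · have hyr : y ∈ rest := by
        rcases List.mem_cons.mp hy with h | h
        · exact absurd (h ▸ hd) hs
        · exact h
      by_cases hc : c ≤ pvSec s <;>
        simp [solutionLoop, hs, hc, ih _ _ ⟨y, hyr, hd⟩]

theorem foldl_max_le_iff : ∀ (l : List Int) (a b : Int),
    l.foldl max a ≤ b ↔ a ≤ b ∧ ∀ x ∈ l, x ≤ b := by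
  intro l
  induction l with
  | nil => simp
  | cons x r ih =>
    intro a b
    simp only [List.foldl_cons, ih, List.mem_cons]
    constructor
    · rintro ⟨h1, h2⟩
      exact ⟨le_trans (le_max_left _ _) h1,
        fun z hz => hz.elim (fun e => e ▸ le_trans (le_max_right _ _) h1) (h2 z)⟩
    · rintro ⟨h1, h2⟩
      exact ⟨max_le h1 (h2 x (Or.inl rfl)), fun z hz => h2 z (Or.inr hz)⟩

theorem solutionBar_le_iff (ss : List (List Int)) (v b : Int) :
    solutionBar ss v ≤ b ↔ 0 ≤ b ∧ ∀ y ∈ ss, v < pvFst y → pvSec y ≤ b := by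
  unfold solutionBar
  rw [foldl_max_le_iff]
  simp only [List.mem_map, List.mem_filter, decide_eq_true_eq]
  constructor
  · rintro ⟨h0, h⟩
    exact ⟨h0, fun y hy hv => h _ ⟨y, ⟨hy, hv⟩, rfl⟩⟩
  · rintro ⟨h0, h⟩
    exact ⟨h0, by rintro x ⟨y, ⟨hy, hv⟩, rfl⟩; exact h y hy hv⟩

theorem key_le_iff (a b : List Int) :
    solutionKey a ≤ solutionKey b ↔
      (pvFst b < pvFst a ∨ (pvFst a = pvFst b ∧ pvSec a ≤ pvSec b)) := by
  unfold solutionKey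
  rw [Prod.Lex.le_iff]
  simp only [ofLex_toLex]
  constructor <;> rintro (h | ⟨h1, h2⟩)
  · exact Or.inl (by omega)
  · exact Or.inr ⟨by omega, h2⟩
  · exact Or.inl (by omega)
  · exact Or.inr ⟨by omega, h2⟩

theorem solutionLoop_count (t0 t1 ts : Int) (L : List (List Int))
    (hPW : L.Pairwise (fun a b => solutionKey a ≤ solutionKey b)) :
    ∀ (l p : List (List Int)) (c ans : Int),
      L = p ++ l →
      c = (p.map pvSec).foldl max 0 →
      (∀ y ∈ l, ¬(t0 < pvFst y ∧ t1 < pvSec y)) →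
      solutionLoop t0 t1 ts l c ans =
        ans + (l.countP (fun x =>
          decide (solutionBar L (pvFst x) ≤ pvSec x) && decide (ts < pvFst x + pvSec x)) : Int) := by
  intro l
  induction l with
  | nil => intro p c ans _ _ _; simp [solutionLoop]
  | cons x r ih =>
    intro p c ans hL hc hnd
    -- pairwise facts
    have hsplit := (List.pairwise_append.mp (hL ▸ hPW))
    have hpx : ∀ y ∈ p, solutionKey y ≤ solutionKey x :=
      fun y hy => hsplit.2.2 y hy x (List.mem_cons_self)
    have hxr : ∀ y ∈ r, solutionKey x ≤ solutionKey y :=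
      fun y hy => (List.pairwise_cons.mp hsplit.2.1).1 y hy
    -- the branch condition equivalence
    have hkey : (c ≤ pvSec x) ↔ (solutionBar L (pvFst x) ≤ pvSec x) := by
      rw [hc, solutionBar_le_iff, foldl_max_le_iff]
      constructor
      · rintro ⟨h0, hp⟩
        refine ⟨h0, fun y hy hv => ?_⟩
        rw [hL, List.mem_append, List.mem_cons] at hy
        rcases hy with hy | hy | hy
        · exact hp _ (List.mem_map.mpr ⟨y, hy, rfl⟩)
        · subst hy; omega
        · rcases (key_le_iff x y).mp (hxr y hy) with h | ⟨h, _⟩ <;> omega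
      · rintro ⟨h0, hAll⟩
        refine ⟨h0, ?_⟩
        rintro z hz
        rcases List.mem_map.mp hz with ⟨y, hy, rfl⟩
        rcases (key_le_iff y x).mp (hpx y hy) with h | ⟨h, h2⟩
        · exact hAll y (hL ▸ List.mem_append_left _ hy) h
        · exact h2
    have hndx := hnd x List.mem_cons_self
    have hndr : ∀ y ∈ r, ¬(t0 < pvFst y ∧ t1 < pvSec y) :=
      fun y hy => hnd y (List.mem_cons_of_mem _ hy)
    have hLr : L = (p ++ [x]) ++ r := by simp [hL]
    have hmax : ((p ++ [x]).map pvSec).foldl max 0 = max c (pvSec x) := by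
      simp [hc, List.foldl_append]
    by_cases hcx : c ≤ pvSec x
    · have hc' : pvSec x = ((p ++ [x]).map pvSec).foldl max 0 := by
        rw [hmax]; omega
      rw [solutionLoop]
      rw [if_neg hndx, if_pos hcx, ih (p ++ [x]) (pvSec x) _ hLr hc' hndr]
      have hbar : (decide (solutionBar L (pvFst x) ≤ pvSec x) = true) := by
        simp [← hkey, hcx]
      rw [List.countP_cons]
      by_cases hts : ts < pvFst x + pvSec x <;>
        simp [hts, hbar]; ring
    · have hc' : c = ((p ++ [x]).map pvSec).foldl max 0 := by
        rw [hmax]; omega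
      rw [solutionLoop]
      rw [if_neg hndx, if_neg hcx, ih (p ++ [x]) c _ hLr hc' hndr]
      have hbar : (decide (solutionBar L (pvFst x) ≤ pvSec x) = false) := by
        simp [← hkey]; omega
      rw [List.countP_cons]
      simp [hbar]

-- ===== VERDICT (by name: the statement is the Claim_ definition above) =====
theorem solution_spec : Claim_equal_solution := by
  intro scores _ _
  unfold Spec_solution solution solution_alt
  set target := scores.headD [] with htarget
  set ts := target.foldl (· + ·) 0 with hts
  set ss := PySem.List.sorted scores solutionKey with hss
  by_cases hdom : ∃ y ∈ ss, pvFst target < pvFst y ∧ pvSec target < pvSec y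
  · rw [solutionLoop_dom _ _ _ _ _ _ hdom]
    simp only [List.any_eq_true]
    rw [if_pos]
    obtain ⟨y, hy, h1, h2⟩ := hdom
    exact ⟨y, hy, by simp [h1, h2]⟩
  · rw [if_neg, solutionLoop_count (pvFst target) (pvSec target) ts ss
      (PySem.List.sorted_pairwise scores solutionKey) ss [] 0 1 rfl rfl]
    · intro y hy hcon
      exact hdom ⟨y, hy, hcon⟩
    · simp only [List.any_eq_true]
      intro ⟨y, hy, hb⟩
      simp only [Bool.and_eq_true, decide_eq_true_eq] at hb
      exact hdom ⟨y, hy, hb⟩
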